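-- pv_equiv track=rewrite | github.com/Williammmdotwo/Bot | src/data_manager/main.py | _deduplicate_klines
-- ===== SOURCE A (Python) =====
-- from typing import Optional, Dict, Any, List, Tuple
--
-- def _deduplicate_klines(klines: List[List]) -> List[List]:
--     """去除重复的K线数据"""
--     if not klines:
--         return []
--
--     # 先按时间戳排序
--     sorted_klines = sorted(klines, key=lambda x: x[0])
--
--     # 按时间戳去重，保留最新的数据
--     seen_timestamps = set()
--     deduplicated = []
--
--     for kline in sorted_klines:
--         timestamp = kline[0]
--         if timestamp not in seen_timestamps:
--             seen_timestamps.add(timestamp)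
--             deduplicated.append(kline)
--
--     return deduplicated
-- ===== SOURCE B (Python) =====
-- from typing import Optional, Dict, Any, List, Tuple
--
-- def _deduplicate_klines(klines: List[List]) -> List[List]:
--     """Index the klines by timestamp in a dict (setdefault keeps the first one
--     seen for each timestamp, matching the stable sort's first-seen semantics),
--     then emit the dict's values in order of sorted timestamps.  Only the
--     distinct timestamps are sorted, not the whole list."""
--     first = {}
--     for k in klines:
--         first.setdefault(k[0], k)
--     return [first[t] for t in sorted(first)]
-- ===== Notes on version B (the rewrite author's own statement) =====
-- stated objective: alternative
-- what changed: Instead of sorting the whole list and then filtering with a seen-set, B builds a timestamp-indexed dict in one pass (setdefault keeps the first kline per timestamp) and then sorts only the distinct timestamps, emitting the dict values in that order.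
import Mathlib
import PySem

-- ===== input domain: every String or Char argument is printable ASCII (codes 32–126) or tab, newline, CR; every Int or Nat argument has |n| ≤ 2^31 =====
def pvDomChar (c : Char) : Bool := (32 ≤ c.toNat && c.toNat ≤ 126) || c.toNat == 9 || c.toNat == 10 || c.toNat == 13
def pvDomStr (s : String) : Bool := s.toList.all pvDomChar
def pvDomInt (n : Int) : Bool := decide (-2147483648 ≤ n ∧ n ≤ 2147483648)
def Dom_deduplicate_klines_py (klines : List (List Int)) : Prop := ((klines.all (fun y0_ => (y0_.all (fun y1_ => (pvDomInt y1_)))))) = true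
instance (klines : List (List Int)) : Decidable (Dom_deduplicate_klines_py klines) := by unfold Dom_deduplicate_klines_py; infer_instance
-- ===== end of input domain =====

-- B replaces A's sort-then-seen-set-filter with a one-pass timestamp-indexed dict (setdefault keeps the first kline per timestamp) followed by a sort of the distinct timestamps only (alternative decomposition; similar cost).


-- shared helper: the key x[0] (exact under Pre_, where every kline is nonempty)
def pvKey (k : List Int) : Int := PySem.List.pyGetD k 0 0

-- ===== PORT A =====
def deduplicate_klines_py (klines : List (List Int)) : List (List Int) :=
  if klines = [] then []
  else
    let sorted_klines := PySem.List.sorted klines (fun x => pvKey x) false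
    (sorted_klines.foldl
      (fun (st : PySem.Set Int × List (List Int)) kline =>
        let timestamp := pvKey kline
        if PySem.Set.contains st.1 timestamp then st
        else (PySem.Set.add st.1 timestamp, st.2 ++ [kline]))
      (PySem.Set.empty, [])).2

-- ===== PORT B =====
def deduplicate_klines_py_alt (klines : List (List Int)) : List (List Int) :=
  let first := klines.foldl (fun d k => PySem.Dict.setdefault d (pvKey k) k) PySem.Dict.empty
  (PySem.List.sorted first.keys (fun t => t) false).map (fun t => PySem.Dict.getD first t [])

-- ===== PRECONDITION & SPEC =====
-- Pre_ excludes inputs containing an empty kline: there Python's kline[0] raises IndexError in both A and B.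
def Pre_deduplicate_klines_py (klines : List (List Int)) : Prop := ∀ k ∈ klines, k ≠ []
instance (klines : List (List Int)) : Decidable (Pre_deduplicate_klines_py klines) := by unfold Pre_deduplicate_klines_py; infer_instance
def pvWitness_deduplicate_klines_py : List (List Int) := [[1, 2], [1, 3], [0, 5]]
def Spec_deduplicate_klines_py (klines : List (List Int)) (out : List (List Int)) : Prop := out = deduplicate_klines_py_alt klines
instance (klines : List (List Int)) (out : List (List Int)) : Decidable (Spec_deduplicate_klines_py klines out) := by unfold Spec_deduplicate_klines_py; infer_instance

-- ===== CLAIM (what is proved, stated in full; the proofs are below) =====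
def Claim_equal_deduplicate_klines_py : Prop := ∀ (klines : List (List Int)), Dom_deduplicate_klines_py klines → Pre_deduplicate_klines_py klines → Spec_deduplicate_klines_py klines (deduplicate_klines_py klines)

-- ===== LEMMAS AND PROOFS =====

-- reference dedup of a key-sorted list: p is the key of the last kept element (none at the start)
def pvRef (p : Option Int) : List (List Int) → List (List Int)
  | [] => []
  | x :: t => if some (pvKey x) = p then pvRef p t else x :: pvRef (some (pvKey x)) t

-- A's loop, on a key-sorted suffix s, equals acc ++ pvRef p s when seen's relevant content is summarised by p
lemma goA_eq (s : List (List Int)) (seen : PySem.Set Int) (acc : List (List Int)) (p : Option Int)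
    (hp : s.Pairwise (fun a b => pvKey a ≤ pvKey b))
    (hA : ∀ k ∈ s, pvKey k ∈ seen → p = some (pvKey k))
    (hB : ∀ k ∈ s, p = some (pvKey k) → pvKey k ∈ seen)
    (hm : ∀ q ∈ seen, ∀ k ∈ s, q ≤ pvKey k) :
    (s.foldl
      (fun (st : PySem.Set Int × List (List Int)) kline =>
        let timestamp := pvKey kline
        if PySem.Set.contains st.1 timestamp then st
        else (PySem.Set.add st.1 timestamp, st.2 ++ [kline]))
      (seen, acc)).2 = acc ++ pvRef p s := by
  induction s generalizing seen acc p with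
  | nil => simp [pvRef]
  | cons x t ih =>
    have hpt : t.Pairwise (fun a b => pvKey a ≤ pvKey b) := hp.of_cons
    have hxle : ∀ k ∈ t, pvKey x ≤ pvKey k := fun k hk => (List.pairwise_cons.mp hp).1 k hk
    by_cases hmem : pvKey x ∈ seen
    · have hcontains : PySem.Set.contains seen (pvKey x) = true := by simpa using hmem
      have hpx : p = some (pvKey x) := hA x (by simp) hmem
      simp only [List.foldl_cons, hcontains, if_pos]
      rw [ih seen acc p hpt (fun k hk => hA k (by simp [hk])) (fun k hk => hB k (by simp [hk]))
          (fun q hq k hk => hm q hq k (by simp [hk]))]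
      simp [pvRef, hpx]
    · have hcontains : PySem.Set.contains seen (pvKey x) = false := by
        simpa using hmem
      have hadd : PySem.Set.add seen (pvKey x) = seen ++ [pvKey x] := by
        simp [PySem.Set.add, hmem]
      simp only [List.foldl_cons, hcontains, Bool.false_eq_true, if_false]
      have hnotp : ¬ (some (pvKey x) = p) := by
        intro h
        exact hmem (hB x (by simp) h.symm)
      rw [hadd] at *
      rw [ih (seen ++ [pvKey x]) (acc ++ [x]) (some (pvKey x)) hpt ?_ ?_ ?_]
      · simp [pvRef, hnotp]
      · intro k hk hkmem
        rcases List.mem_append.mp hkmem with hin | hx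
        · have h1 : pvKey k ≤ pvKey x := hm (pvKey k) hin x (by simp)
          have h2 : pvKey x ≤ pvKey k := hxle k hk
          have : pvKey x = pvKey k := le_antisymm h2 h1
          exact absurd (this ▸ hin) hmem
        · simp only [List.mem_singleton] at hx
          simp [hx]
      · intro k hk hkp
        simp only [Option.some.injEq] at hkp
        simp [← hkp]
      · intro q hq k hk
        rcases List.mem_append.mp hq with hin | hx
        · have := hm q hin x (by simp)
          exact le_trans this (hxle k hk)
        · simp only [List.mem_singleton] at hx
          exact hx ▸ hxle k hk

-- pvRef of a key-sorted list: every kept key exceeds p, and the kept keys are strictly increasing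
lemma pvRef_gt_and_pairwise (s : List (List Int)) (p : Option Int)
    (hp : s.Pairwise (fun a b => pvKey a ≤ pvKey b))
    (hlo : ∀ z ∈ s, ∀ q, p = some q → q ≤ pvKey z) :
    (∀ x ∈ pvRef p s, ∀ q, p = some q → q < pvKey x) ∧
    (pvRef p s).Pairwise (fun a b => pvKey a < pvKey b) := by
  induction s generalizing p with
  | nil => simp [pvRef]
  | cons y t ih =>
    have hpt : t.Pairwise (fun a b => pvKey a ≤ pvKey b) := hp.of_cons
    have hyle : ∀ k ∈ t, pvKey y ≤ pvKey k := fun k hk => (List.pairwise_cons.mp hp).1 k hk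
    by_cases hy : some (pvKey y) = p
    · have := ih p hpt (fun z hz q hq => hlo z (by simp [hz]) q hq)
      simpa [pvRef, hy] using this
    · have hlo' : ∀ z ∈ t, ∀ q, some (pvKey y) = some q → q ≤ pvKey z := by
        intro z hz q hq
        simp only [Option.some.injEq] at hq
        exact hq ▸ hyle z hz
      obtain ⟨iha, ihb⟩ := ih (some (pvKey y)) hpt hlo'
      refine ⟨?_, ?_⟩
      · intro x hx q hq
        simp only [pvRef, if_neg hy, List.mem_cons] at hx
        rcases hx with rfl | hx
        · have h1 : q ≤ pvKey x := hlo x (by simp) q hq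
          have h2 : q ≠ pvKey x := by
            intro h
            exact hy (by rw [hq, h])
          omega
        · have h1 : pvKey y < pvKey x := iha x hx (pvKey y) rfl
          have h2 : q ≤ pvKey y := hlo y (by simp) q hq
          omega
      · simp only [pvRef, if_neg hy]
        exact List.pairwise_cons.mpr ⟨fun x hx => iha x hx (pvKey y) rfl, ihb⟩

-- each kept kline is the FIRST element of the (sorted) list with its key
lemma pvRef_find (s : List (List Int)) (p : Option Int)
    (hp : s.Pairwise (fun a b => pvKey a ≤ pvKey b))
    (hlo : ∀ z ∈ s, ∀ q, p = some q → q ≤ pvKey z) :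
    ∀ x ∈ pvRef p s, s.find? (fun k => pvKey k == pvKey x) = some x := by
  induction s generalizing p with
  | nil => simp [pvRef]
  | cons y t ih =>
    have hpt : t.Pairwise (fun a b => pvKey a ≤ pvKey b) := hp.of_cons
    have hyle : ∀ k ∈ t, pvKey y ≤ pvKey k := fun k hk => (List.pairwise_cons.mp hp).1 k hk
    intro x hx
    by_cases hy : some (pvKey y) = p
    · simp only [pvRef, if_pos hy] at hx
      have hgt : pvKey y < pvKey x := by
        have := (pvRef_gt_and_pairwise t p hpt
          (fun z hz q hq => hlo z (by simp [hz]) q hq)).1 x hx (pvKey y) hy.symm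
        exact this
      have hne : (pvKey y == pvKey x) = false := by simp; omega
      simp only [List.find?_cons, hne]
      exact ih p hpt (fun z hz q hq => hlo z (by simp [hz]) q hq) x hx
    · have hlo' : ∀ z ∈ t, ∀ q, some (pvKey y) = some q → q ≤ pvKey z := by
        intro z hz q hq
        simp only [Option.some.injEq] at hq
        exact hq ▸ hyle z hz
      simp only [pvRef, if_neg hy, List.mem_cons] at hx
      rcases hx with rfl | hx
      · simp
      · have hgt : pvKey y < pvKey x :=
          (pvRef_gt_and_pairwise t (some (pvKey y)) hpt hlo').1 x hx (pvKey y) rfl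
        have hne : (pvKey y == pvKey x) = false := by simp; omega
        simp only [List.find?_cons, hne]
        exact ih (some (pvKey y)) hpt hlo' x hx

-- every key present in the list is kept by pvRef (unless it is p itself)
lemma pvRef_surj (s : List (List Int)) (p : Option Int) (c : Int)
    (hp : s.Pairwise (fun a b => pvKey a ≤ pvKey b))
    (hc : ∃ z ∈ s, pvKey z = c)
    (hcp : ∀ q, p = some q → c ≠ q) :
    ∃ x ∈ pvRef p s, pvKey x = c := by
  induction s generalizing p with
  | nil => simp at hc
  | cons y t ih =>
    have hpt : t.Pairwise (fun a b => pvKey a ≤ pvKey b) := hp.of_cons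
    by_cases hy : some (pvKey y) = p
    · obtain ⟨z, hz, hzc⟩ := hc
      rcases List.mem_cons.mp hz with rfl | hz
      · exact absurd (hzc ▸ (hcp (pvKey z) hy.symm)) (by simp)
      · have ⟨x, hx, hxc⟩ := ih p hpt ⟨z, hz, hzc⟩ hcp
        exact ⟨x, by simp [pvRef, hy, hx], hxc⟩
    · by_cases hyc : pvKey y = c
      · exact ⟨y, by simp [pvRef, hy], hyc⟩
      · obtain ⟨z, hz, hzc⟩ := hc
        rcases List.mem_cons.mp hz with rfl | hz
        · exact absurd hzc hyc
        · have ⟨x, hx, hxc⟩ := ih (some (pvKey y)) hpt ⟨z, hz, hzc⟩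
            (by intro q hq; simp only [Option.some.injEq] at hq; exact hq ▸ fun h => hyc h.symm)
          exact ⟨x, by simp [pvRef, hy]; right; exact hx, hxc⟩

-- find? over an insertion step of PySem's (stable) insertion sort
lemma find_insertBy (x : List Int) (ys : List (List Int)) (t : Int)
    (hys : ys.Pairwise (fun a b => pvKey a ≤ pvKey b)) :
    (PySem.List.insertBy (fun a b => decide (pvKey a < pvKey b)) x ys).find?
        (fun k => pvKey k == t) =
      (ys.find? (fun k => pvKey k == t)).or (if pvKey x = t then some x else none) := by
  induction ys with
  | nil =>
    by_cases h : pvKey x = t <;>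
      simp [PySem.List.insertBy, h]
  | cons y ys ih =>
    have hyt : ys.Pairwise (fun a b => pvKey a ≤ pvKey b) := hys.of_cons
    have hyle : ∀ k ∈ ys, pvKey y ≤ pvKey k := fun k hk => (List.pairwise_cons.mp hys).1 k hk
    by_cases hlt : pvKey x < pvKey y
    · simp only [PySem.List.insertBy, decide_eq_true_eq, if_pos hlt]
      by_cases hxt : pvKey x = t
      · -- all keys in y :: ys are > t, so find? there is none
        have hnone : (y :: ys).find? (fun k => pvKey k == t) = none := by
          rw [List.find?_eq_none]
          intro k hk
          rcases List.mem_cons.mp hk with rfl | hk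
          · simp; omega
          · have := hyle k hk
            simp; omega
        simp [hxt, hnone]
      · have hxb : (pvKey x == t) = false := by simp [hxt]
        simp [List.find?_cons, hxb, hxt]
    · simp only [PySem.List.insertBy, decide_eq_true_eq, if_neg hlt]
      by_cases hyt' : pvKey y = t
      · simp [hyt']
      · have hyb : (pvKey y == t) = false := by simp [hyt']
        simp only [List.find?_cons, hyb]
        exact ih hyt

-- STABILITY of PySem.List.sorted: the first element with a given key is unchanged by sorting
lemma sorted_stable_find (xs : List (List Int)) (t : Int) :
    (PySem.List.sorted xs (fun x => pvKey x) false).find? (fun k => pvKey k == t) =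
      xs.find? (fun k => pvKey k == t) := by
  induction xs using List.reverseRecOn with
  | nil => simp [PySem.List.sorted]
  | append_singleton xs x ih =>
    have hstep : PySem.List.sorted (xs ++ [x]) (fun x => pvKey x) false =
        PySem.List.insertBy (fun a b => decide (pvKey a < pvKey b)) x
          (PySem.List.sorted xs (fun x => pvKey x) false) := by
      rw [PySem.List.sorted_eq_foldl_insertBy, PySem.List.sorted_eq_foldl_insertBy,
        List.foldl_append]
      rfl
    rw [hstep, find_insertBy x _ t (PySem.List.sorted_pairwise xs _), ih,
      List.find?_append]
    congr 1
    by_cases h : pvKey x = t <;> simp [h]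

-- B's dict after the fold: lookup is "first kline in the list with that key"
lemma dict_fold_get? (l : List (List Int)) (d : PySem.Dict Int (List Int)) (t : Int) :
    (l.foldl (fun d k => PySem.Dict.setdefault d (pvKey k) k) d).get? t =
      (d.get? t).or (l.find? (fun k => pvKey k == t)) := by
  induction l generalizing d with
  | nil => simp
  | cons k l ih =>
    simp only [List.foldl_cons]
    by_cases hc : d.contains (pvKey k) = true
    · rw [PySem.Dict.setdefault_of_contains d k hc, ih]
      by_cases hkt : pvKey k = t
      · have hsome : (d.get? t).isSome = true := by
          rw [← hkt, ← PySem.Dict.contains_eq_isSome_get?]; exact hc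
        obtain ⟨v, hv⟩ := Option.isSome_iff_exists.mp hsome
        simp [List.find?_cons, hv]
      · have : (pvKey k == t) = false := by simp [hkt]
        simp [this]
    · rw [PySem.Dict.setdefault_of_not_contains d k (by simpa using hc), ih]
      by_cases hkt : pvKey k = t
      · have hnone : d.get? t = none := by
          rw [← hkt, ← Option.not_isSome_iff_eq_none, ← PySem.Dict.contains_eq_isSome_get?]
          exact hc
        rw [PySem.Dict.get?_insert]
        simp [hkt, hnone]
      · rw [PySem.Dict.get?_insert]
        have : (pvKey k == t) = false := by simp [hkt]
        simp [Ne.symm hkt, this]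

-- B's dict keys stay duplicate-free through the fold
lemma dict_fold_nodup (l : List (List Int)) (d : PySem.Dict Int (List Int))
    (hd : d.keys.Nodup) :
    (l.foldl (fun d k => PySem.Dict.setdefault d (pvKey k) k) d).keys.Nodup := by
  induction l generalizing d with
  | nil => exact hd
  | cons k l ih =>
    simp only [List.foldl_cons]
    by_cases hc : d.contains (pvKey k) = true
    · rw [PySem.Dict.setdefault_of_contains d k hc]
      exact ih d hd
    · rw [PySem.Dict.setdefault_of_not_contains d k (by simpa using hc)]
      refine ih _ ?_
      rw [PySem.Dict.keys_insert_of_not_contains (d := d) (k := pvKey k) (v := k) (by simpa using hc)]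
      refine List.Nodup.append hd (by simp) ?_
      intro a ha hb
      simp only [List.mem_singleton] at hb
      subst hb
      have hno : pvKey k ∉ d.keys := by
        simpa [PySem.Dict.contains_iff_mem_keys] using hc
      exact hno ha

-- ===== VERDICT (by name: the statement is the Claim_ definition above) =====
theorem deduplicate_klines_py_spec : Claim_equal_deduplicate_klines_py := by
  intro klines _ _
  unfold Spec_deduplicate_klines_py deduplicate_klines_py deduplicate_klines_py_alt
  by_cases hnil : klines = []
  · subst hnil
    simp [PySem.List.sorted]
  · rw [if_neg hnil]
    set s := PySem.List.sorted klines (fun x => pvKey x) false with hs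
    set d := klines.foldl (fun d k => PySem.Dict.setdefault d (pvKey k) k) PySem.Dict.empty with hd
    have hsp : s.Pairwise (fun a b => pvKey a ≤ pvKey b) := PySem.List.sorted_pairwise klines _
    -- A's loop is pvRef none s
    rw [goA_eq s PySem.Set.empty [] none hsp (by simp [PySem.Set.empty])
        (by simp) (by simp [PySem.Set.empty]), List.nil_append]
    show pvRef none s =
      (PySem.List.sorted d.keys (fun t => t) false).map (fun t => PySem.Dict.getD d t [])
    -- dict lookup at t is the first kline of s with key t
    have hget : ∀ t, d.get? t = s.find? (fun k => pvKey k == t) := by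
      intro t
      rw [hd, dict_fold_get?, hs, sorted_stable_find]
      simp
    have hnodupd : d.keys.Nodup := dict_fold_nodup klines PySem.Dict.empty (by simp)
    have hgt := pvRef_gt_and_pairwise s none hsp (by simp)
    have hnodupA : ((pvRef none s).map pvKey).Nodup := by
      rw [List.nodup_iff_pairwise_ne (l := (pvRef none s).map pvKey), List.pairwise_map]
      exact hgt.2.imp (fun h => ne_of_lt h)
    -- the kept keys are exactly d.keys
    have hmemkeys : ∀ t, t ∈ (pvRef none s).map pvKey ↔ t ∈ d.keys := by
      intro t
      constructor
      · intro ht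
        obtain ⟨x, hx, rfl⟩ := List.mem_map.mp ht
        have hfind := pvRef_find s none hsp (by simp) x hx
        have : d.contains (pvKey x) = true := by
          rw [PySem.Dict.contains_eq_isSome_get?, hget, hfind]
          rfl
        exact (PySem.Dict.contains_iff_mem_keys d (pvKey x)).mp this
      · intro ht
        have hcont : d.contains t = true := (PySem.Dict.contains_iff_mem_keys d t).mpr ht
        rw [PySem.Dict.contains_eq_isSome_get?, hget] at hcont
        obtain ⟨z, hz⟩ := Option.isSome_iff_exists.mp hcont
        have hzs : z ∈ s := List.mem_of_find?_eq_some hz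
        have hzc : pvKey z = t := by simpa using List.find?_some hz
        obtain ⟨x, hx, hxc⟩ := pvRef_surj s none t hsp ⟨z, hzs, hzc⟩ (by simp)
        exact List.mem_map.mpr ⟨x, hx, hxc⟩
    have hkeys : PySem.List.sorted d.keys (fun t => t) false = (pvRef none s).map pvKey := by
      apply PySem.List.sorted_eq_of_perm_of_pairwise_lt
      · exact (List.perm_ext_iff_of_nodup hnodupA hnodupd).mpr hmemkeys
      · rw [List.pairwise_map]
        exact hgt.2
    rw [hkeys, List.map_map]
    have hid : ∀ x ∈ pvRef none s, ((fun t => PySem.Dict.getD d t []) ∘ pvKey) x = id x := by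
      intro x hx
      have hfind := pvRef_find s none hsp (by simp) x hx
      simp only [Function.comp_apply, id_eq]
      exact PySem.Dict.getD_of_get?_eq_some d [] ((hget (pvKey x)).trans hfind)
    rw [List.map_congr_left hid, List.map_id]
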